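-- pv_equiv track=rewrite | github.com/dyuthimalepati9/leetcode-problems | 3887-incremental-even-weighted-cycle-queries/3887-incremental-even-weighted-cycle-queries.py | numberOfEdgesAdded
-- ===== SOURCE A (Python) =====
-- def numberOfEdgesAdded(n: int, edges: list[list[int]]) -> int:
--     parent = list(range(n))
--     parity = [0] * n
--     def find(x):
--         if parent[x] != x:
--             px = parent[x]
--             parent[x] = find(px)
--             parity[x] ^= parity[px]
--         return parent[x]
--     def union(u, v, w):
--         ru, rv = find(u), find(v)
--         if ru == rv:
--             return (parity[u] ^ parity[v] ^ w) == 0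
--         parent[ru] = rv
--         parity[ru] = parity[u] ^ parity[v] ^ w
--         return True
--     res = 0
--     for u, v, w in edges:
--         if union(u, v, w):
--             res += 1
--     return res
-- ===== SOURCE B (Python) =====
-- def numberOfEdgesAdded(n: int, edges: list[list[int]]) -> int:
--     parent = list(range(n))
--     parity = [0] * n
--     def find(x):
--         # first pass: walk up to the root, recording each node with its parent
--         path = []
--         while parent[x] != x:
--             path.append((x, parent[x]))
--             x = parent[x]
--         root = x
--         # second pass (root-ward first): point each visited node at the root,
--         # its parity becoming its xor-offset to the root
--         for node, nxt in reversed(path):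
--             parity[node] ^= parity[nxt]
--             parent[node] = root
--         return root
--     def union(u, v, w):
--         ru = find(u)
--         rv = find(v)
--         d = parity[u] ^ parity[v] ^ w
--         if ru == rv:
--             return d == 0
--         parent[ru] = rv
--         parity[ru] = d
--         return True
--     res = 0
--     for u, v, w in edges:
--         if union(u, v, w):
--             res += 1
--     return res
-- ===== Notes on version B (the rewrite author's own statement) =====
-- stated objective: alternative
-- what changed: The recursive path-compressing find is replaced by a two-pass iterative find: a first loop walks parent pointers to the root recording the path, a second loop re-points every recorded node to the root with its xor-offset parity; union computes the parity difference once before branching.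
import Mathlib
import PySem

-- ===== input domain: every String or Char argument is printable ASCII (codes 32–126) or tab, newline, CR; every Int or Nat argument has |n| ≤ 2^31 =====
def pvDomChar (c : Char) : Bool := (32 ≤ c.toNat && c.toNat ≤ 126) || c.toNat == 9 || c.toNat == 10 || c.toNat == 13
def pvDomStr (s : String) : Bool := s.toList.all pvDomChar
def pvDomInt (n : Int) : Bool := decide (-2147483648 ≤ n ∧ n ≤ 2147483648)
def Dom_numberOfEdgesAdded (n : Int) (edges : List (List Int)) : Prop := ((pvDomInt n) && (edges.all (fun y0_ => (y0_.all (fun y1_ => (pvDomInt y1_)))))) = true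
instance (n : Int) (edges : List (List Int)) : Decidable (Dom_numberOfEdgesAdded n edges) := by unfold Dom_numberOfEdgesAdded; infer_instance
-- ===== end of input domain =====

-- B replaces A's recursive path-compressing `find` by a two-pass iterative one
-- (walk to the root recording the path, then re-point the recorded nodes);
-- objective: alternative decomposition, same cost. Both mutate only local state.


-- ===== PORT A =====
-- Python list indexing l[x] for -len ≤ x < len (exact on that range)
def pvIdxA (len : Nat) (x : Int) : Nat := if x < 0 then (x + len).toNat else x.toNat
-- recursive `find` with path compression; `fuel` only makes the recursion
-- structural (Python bounds it by the acyclic parent chains; n+3 suffices)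
def findA : Nat → List Int → List Int → Int → List Int × List Int × Int
  | 0, parent, parity, _ => (parent, parity, 0)
  | Nat.succ fuel, parent, parity, x =>
    let i := pvIdxA parent.length x
    let px := parent.getD i 0
    if px ≠ x then
      let r3 := findA fuel parent parity px
      let parent2 := r3.1.set i r3.2.2                       -- parent[x] = find(px)
      let j := pvIdxA parent.length px
      let parity2 := r3.2.1.set i (PySem.Int.bxor (r3.2.1.getD i 0) (r3.2.1.getD j 0))  -- parity[x] ^= parity[px]
      (parent2, parity2, r3.2.2)                             -- return parent[x] (just assigned)
    else
      (parent, parity, px)                                   -- return parent[x] (= x)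

def unionA (fuel : Nat) (parent parity : List Int) (u v w : Int) : List Int × List Int × Bool :=
  let f1 := findA fuel parent parity u
  let f2 := findA fuel f1.1 f1.2.1 v
  let pu := f2.2.1.getD (pvIdxA f2.2.1.length u) 0
  let pv := f2.2.1.getD (pvIdxA f2.2.1.length v) 0
  if f1.2.2 = f2.2.2 then
    (f2.1, f2.2.1, decide (PySem.Int.bxor (PySem.Int.bxor pu pv) w = 0))
  else
    (f2.1.set (pvIdxA f2.1.length f1.2.2) f2.2.2,
     f2.2.1.set (pvIdxA f2.2.1.length f1.2.2) (PySem.Int.bxor (PySem.Int.bxor pu pv) w),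
     true)

def numberOfEdgesAdded (n : Int) (edges : List (List Int)) : Int :=
  let parent := PySem.List.pyRange 0 n 1
  let parity := List.replicate n.toNat (0 : Int)
  (edges.foldl (fun (st : List Int × List Int × Int) e =>
      match e with
      | [u, v, w] =>
        let r := unionA (st.1.length + 3) st.1 st.2.1 u v w
        (r.1, r.2.1, if r.2.2 then st.2.2 + 1 else st.2.2)
      | _ => st                      -- unreachable under Pre_: Python raises ValueError
    ) (parent, parity, 0)).2.2

-- ===== PORT B =====
-- Python list indexing l[x] for -len ≤ x < len (exact on that range)
def pvIdxB (len : Nat) (x : Int) : Nat := (if x < 0 then x + len else x).toNat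
-- first pass: walk to the root, recording (node, its parent) pairs
def walkB : Nat → List Int → Int → List (Int × Int) × Int
  | 0, _, _ => ([], 0)
  | Nat.succ fuel, parent, x =>
    let px := parent.getD (pvIdxB parent.length x) 0
    if px ≠ x then
      let pr := walkB fuel parent px
      ((x, px) :: pr.1, pr.2)
    else
      ([], x)

-- second pass, one recorded node: parity[node] ^= parity[nxt]; parent[node] = root
def compressB (root : Int) (st : List Int × List Int) (p : Int × Int) : List Int × List Int :=
  let i := pvIdxB st.1.length p.1
  let j := pvIdxB st.1.length p.2
  (st.1.set i root, st.2.set i (PySem.Int.bxor (st.2.getD i 0) (st.2.getD j 0)))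

def findB (fuel : Nat) (parent parity : List Int) (x : Int) : List Int × List Int × Int :=
  let wr := walkB fuel parent x
  let st := wr.1.reverse.foldl (compressB wr.2) (parent, parity)
  (st.1, st.2, wr.2)

def unionB (fuel : Nat) (parent parity : List Int) (u v w : Int) : List Int × List Int × Bool :=
  let f1 := findB fuel parent parity u
  let f2 := findB fuel f1.1 f1.2.1 v
  let d := PySem.Int.bxor (PySem.Int.bxor (f2.2.1.getD (pvIdxB f2.2.1.length u) 0)
                                          (f2.2.1.getD (pvIdxB f2.2.1.length v) 0)) w
  if f1.2.2 = f2.2.2 then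
    (f2.1, f2.2.1, decide (d = 0))
  else
    (f2.1.set (pvIdxB f2.1.length f1.2.2) f2.2.2,
     f2.2.1.set (pvIdxB f2.2.1.length f1.2.2) d,
     true)

-- `u, v, w = e` (ValueError, i.e. `none`, unless e has exactly three items)
def pvEdgeB (e : List Int) : Option (Int × Int × Int) :=
  if e.length = 3 then some (e.getD 0 0, e.getD 1 0, e.getD 2 0) else none

def goB (parent parity : List Int) (res : Int) : List (List Int) → Int
  | [] => res
  | e :: rest =>
    match pvEdgeB e with
    | some (u, v, w) =>
      let r := unionB (parent.length + 3) parent parity u v w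
      goB r.1 r.2.1 (if r.2.2 then res + 1 else res) rest
    | none => goB parent parity res rest   -- unreachable under Pre_

def numberOfEdgesAdded_alt (n : Int) (edges : List (List Int)) : Int :=
  goB (PySem.List.pyRange 0 n 1) (List.replicate n.toNat (0 : Int)) 0 edges

-- ===== PRECONDITION & SPEC =====
-- Pre_ excludes exactly the inputs where Python A raises: an edge not of length 3
-- (ValueError on unpacking) or an endpoint outside [-n, n) (IndexError).
def Pre_numberOfEdgesAdded (n : Int) (edges : List (List Int)) : Prop :=
  ∀ e ∈ edges, e.length = 3 ∧ -n ≤ e.getD 0 0 ∧ e.getD 0 0 < n ∧ -n ≤ e.getD 1 0 ∧ e.getD 1 0 < n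
instance (n : Int) (edges : List (List Int)) : Decidable (Pre_numberOfEdgesAdded n edges) := by unfold Pre_numberOfEdgesAdded; infer_instance

def pvWitness_numberOfEdgesAdded : Int × List (List Int) := (3, [[0, 1, 1], [1, 2, 1], [0, 2, 0]])

def Spec_numberOfEdgesAdded (n : Int) (edges : List (List Int)) (out : Int) : Prop := out = numberOfEdgesAdded_alt n edges
instance (n : Int) (edges : List (List Int)) (out : Int) : Decidable (Spec_numberOfEdgesAdded n edges out) := by unfold Spec_numberOfEdgesAdded; infer_instance

-- ===== CLAIM (what is proved, stated in full; the proofs are below) =====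
def Claim_equal_numberOfEdgesAdded : Prop := ∀ (n : Int) (edges : List (List Int)), Dom_numberOfEdgesAdded n edges → Pre_numberOfEdgesAdded n edges → Spec_numberOfEdgesAdded n edges (numberOfEdgesAdded n edges)

-- ===== LEMMAS AND PROOFS =====

theorem pvIdxB_eq_pvIdxA : pvIdxB = pvIdxA := by
  funext len x
  unfold pvIdxB pvIdxA
  split <;> rfl

theorem findA_len (fuel : Nat) (parent parity : List Int) (x : Int) :
    (findA fuel parent parity x).1.length = parent.length ∧
    (findA fuel parent parity x).2.1.length = parity.length := by
  induction fuel generalizing parent parity x with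
  | zero => simp [findA]
  | succ fuel ih =>
    simp only [findA]
    split
    · simpa using ih parent parity _
    · simp

-- key lemma: the iterative two-pass find equals the recursive compressing find
theorem findB_eq_findA (fuel : Nat) (parent parity : List Int) (x : Int) :
    findB fuel parent parity x = findA fuel parent parity x := by
  induction fuel generalizing parent parity x with
  | zero => simp [findB, findA, walkB]
  | succ fuel ih =>
    simp only [findB, findA, walkB, pvIdxB_eq_pvIdxA]
    split
    · -- parent[x] ≠ x
      rename_i h
      have hB := ih parent parity (parent.getD (pvIdxA parent.length x) 0)
      simp only [findB] at hB
      -- components of the inner state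
      have h1 : ((walkB fuel parent (parent.getD (pvIdxA parent.length x) 0)).1.reverse.foldl
          (compressB (walkB fuel parent (parent.getD (pvIdxA parent.length x) 0)).2) (parent, parity)).1
          = (findA fuel parent parity (parent.getD (pvIdxA parent.length x) 0)).1 := by
        exact congrArg Prod.fst hB
      have h2 : ((walkB fuel parent (parent.getD (pvIdxA parent.length x) 0)).1.reverse.foldl
          (compressB (walkB fuel parent (parent.getD (pvIdxA parent.length x) 0)).2) (parent, parity)).2
          = (findA fuel parent parity (parent.getD (pvIdxA parent.length x) 0)).2.1 := by
        have := congrArg (fun t => t.2.1) hB; simpa using this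
      have h3 : (walkB fuel parent (parent.getD (pvIdxA parent.length x) 0)).2
          = (findA fuel parent parity (parent.getD (pvIdxA parent.length x) 0)).2.2 := by
        have := congrArg (fun t => t.2.2) hB; simpa [findB] using this
      rw [h3] at h1 h2
      simp only [List.reverse_cons, List.foldl_append, List.foldl_cons, List.foldl_nil]
      simp only [compressB, pvIdxB_eq_pvIdxA, h3, h1, h2]
      rw [(findA_len fuel parent parity (parent.getD (pvIdxA parent.length x) 0)).1]
    · rename_i h
      rw [not_ne_iff] at h
      simpa [List.getD] using h.symm

theorem unionB_eq_unionA (fuel : Nat) (parent parity : List Int) (u v w : Int) :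
    unionB fuel parent parity u v w = unionA fuel parent parity u v w := by
  simp only [unionB, unionA, findB_eq_findA, pvIdxB_eq_pvIdxA]

theorem goB_eq_foldA (edges : List (List Int)) (parent parity : List Int) (res : Int) :
    goB parent parity res edges =
      (edges.foldl (fun (st : List Int × List Int × Int) e =>
        match e with
        | [u, v, w] =>
          let r := unionA (st.1.length + 3) st.1 st.2.1 u v w
          (r.1, r.2.1, if r.2.2 then st.2.2 + 1 else st.2.2)
        | _ => st) (parent, parity, res)).2.2 := by
  induction edges generalizing parent parity res with
  | nil => simp [goB]
  | cons e rest ih =>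
    match e with
    | [] => simpa [goB, pvEdgeB] using ih parent parity res
    | [a] => simpa [goB, pvEdgeB] using ih parent parity res
    | [a, b] => simpa [goB, pvEdgeB] using ih parent parity res
    | [u, v, w] =>
      simp only [goB, pvEdgeB, List.foldl_cons, unionB_eq_unionA]
      exact ih _ _ _
    | a :: b :: c :: d :: t => simpa [goB, pvEdgeB] using ih parent parity res

-- ===== VERDICT (by name: the statement is the Claim_ definition above) =====
theorem numberOfEdgesAdded_spec : Claim_equal_numberOfEdgesAdded := by
  intro n edges _ _
  unfold Spec_numberOfEdgesAdded numberOfEdgesAdded numberOfEdgesAdded_alt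
  simp only [goB_eq_foldA]
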